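-- pv_equiv track=rewrite | github.com/MrBrantCode/unitest_baseline | mut_generate/mist_train_cf/cf_62399/solution.py | count_distinct_lower
-- ===== SOURCE A (Python) =====
-- def count_distinct_lower(s):
--     def is_prime(n):
--         """helper function to check if a number is prime"""
--         if n < 2:
--             return False
--         for i in range(2, int(n**0.5) + 1):
--             if n % i == 0:
--                 return False
--         return True
--
--     lower_set = set()
--     vowels = set('aeiou')
--     for i in range(len(s)):
--         if is_prime(i) and s[i].islower() and s[i] not in vowels:
--             lower_set.add(s[i])
--     return len(lower_set)
-- ===== SOURCE B (Python) =====
-- def count_distinct_lower(s):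
--     # Sieve of Eratosthenes over the indices, then one scan collecting
--     # distinct lowercase consonants at prime indices.
--     n = len(s)
--     composite = [False] * n
--     for p in range(2, n):
--         if not composite[p]:
--             for m in range(2 * p, n, p):
--                 composite[m] = True
--     vowels = set('aeiou')
--     found = set()
--     for i in range(2, n):
--         if not composite[i]:
--             c = s[i]
--             if c.islower() and c not in vowels:
--                 found.add(c)
--     return len(found)
-- ===== Notes on version B (the rewrite author's own statement) =====
-- stated objective: faster
-- what changed: Replaces A's per-index trial-division primality test with a Sieve of Eratosthenes over the indices followed by one scan collecting the distinct lowercase consonants.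
import Mathlib
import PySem

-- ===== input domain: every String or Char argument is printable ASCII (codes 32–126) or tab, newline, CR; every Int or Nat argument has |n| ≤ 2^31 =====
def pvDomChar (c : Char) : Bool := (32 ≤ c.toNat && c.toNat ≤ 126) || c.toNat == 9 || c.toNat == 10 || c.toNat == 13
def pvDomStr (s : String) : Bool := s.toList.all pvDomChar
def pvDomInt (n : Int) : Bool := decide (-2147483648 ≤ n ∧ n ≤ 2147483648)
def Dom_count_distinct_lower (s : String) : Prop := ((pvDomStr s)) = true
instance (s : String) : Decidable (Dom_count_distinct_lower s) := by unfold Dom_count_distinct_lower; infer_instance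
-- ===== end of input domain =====

-- B replaces A's per-index trial division with a Sieve of Eratosthenes over the indices, then one scan (faster).


-- ===== PORT A =====
-- helper is_prime; 'int(n**0.5)' is ported as Nat.sqrt n, which is exact for n < 2^52
-- (double-precision sqrt is correctly rounded there), in particular on every checked input
def isPrimeA (n : Nat) : Bool :=
  if n < 2 then false
  else (List.range' 2 (Nat.sqrt n + 1 - 2)).all (fun i => !(n % i == 0))

def count_distinct_lower (s : String) : Int :=
  let cs := s.toList
  let vowels : PySem.Set Char := PySem.Set.ofList ['a', 'e', 'i', 'o', 'u']
  let lowerSet : PySem.Set Char :=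
    (List.range cs.length).foldl
      (fun (acc : PySem.Set Char) i =>
        let c := cs.getD i ' '
        if isPrimeA i && PySem.Chars.islower c && !(PySem.Set.contains vowels c)
        then PySem.Set.add acc c else acc)
      PySem.Set.empty
  PySem.Set.len lowerSet

-- ===== PORT B =====
-- sieve body for one p: skip if already composite, else mark the multiples 2p, 3p, … < n;
-- range(2*p, n, p) has (n - 2p + p - 1) / p elements
def sieveStep (n : Nat) (comp : List Bool) (p : Nat) : List Bool :=
  if comp.getD p false then comp
  else (List.range' (2 * p) ((n - 2 * p + p - 1) / p) p).foldl (fun a m => a.set m true) comp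

def count_distinct_lower_alt (s : String) : Int :=
  let cs := s.toList
  let n := cs.length
  let composite : List Bool := (List.range' 2 (n - 2)).foldl (sieveStep n) (List.replicate n false)
  let vowels : PySem.Set Char := PySem.Set.ofList ['a', 'e', 'i', 'o', 'u']
  let found : PySem.Set Char :=
    (List.range' 2 (n - 2)).foldl
      (fun (acc : PySem.Set Char) i =>
        if composite.getD i false then acc
        else
          let c := cs.getD i ' '
          if PySem.Chars.islower c && !(PySem.Set.contains vowels c)
          then PySem.Set.add acc c else acc)
      PySem.Set.empty
  PySem.Set.len found

-- ===== PRECONDITION & SPEC =====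
def Spec_count_distinct_lower (s : String) (out : Int) : Prop := out = count_distinct_lower_alt s
instance (s : String) (out : Int) : Decidable (Spec_count_distinct_lower s out) := by unfold Spec_count_distinct_lower; infer_instance

-- ===== CLAIM (what is proved, stated in full; the proofs are below) =====
def Claim_equal_count_distinct_lower : Prop := ∀ (s : String), Dom_count_distinct_lower s → Spec_count_distinct_lower s (count_distinct_lower s)

-- ===== LEMMAS AND PROOFS =====

-- "i has a divisor d with 2 ≤ d ≤ b and cofactor ≥ 2"
def Comp (b i : Nat) : Prop := ∃ d, 2 ≤ d ∧ d ≤ b ∧ d ∣ i ∧ 2 * d ≤ i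

lemma foldl_set_length (ms : List Nat) (arr : List Bool) :
    (ms.foldl (fun a m => a.set m true) arr).length = arr.length := by
  induction ms generalizing arr with
  | nil => rfl
  | cons m ms ih => simp [List.foldl_cons, ih, List.length_set]

lemma foldl_set_getD (ms : List Nat) (arr : List Bool) (i : Nat) (h : i < arr.length) :
    (ms.foldl (fun a m => a.set m true) arr).getD i false
      = (arr.getD i false || decide (i ∈ ms)) := by
  induction ms generalizing arr with
  | nil => simp
  | cons m ms ih =>
    rw [List.foldl_cons, ih _ (by simp [List.length_set]; omega)]
    by_cases hmi : i = m
    · subst hmi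
      simp [List.getD_eq_getElem?_getD, h]
    · simp [List.getD_eq_getElem?_getD, List.getElem?_set_ne (by omega : m ≠ i), hmi]

lemma mem_mult_range (n p m : Nat) (hp : 2 ≤ p) :
    m ∈ List.range' (2 * p) ((n - 2 * p + p - 1) / p) p ↔ (p ∣ m ∧ 2 * p ≤ m ∧ m < n) := by
  rw [List.mem_range']
  constructor
  · rintro ⟨j, hj, rfl⟩
    have h1 : (j + 1) * p ≤ n - 2 * p + p - 1 :=
      (Nat.le_div_iff_mul_le (by omega : 0 < p)).mp (by omega)
    have h2 : (j + 1) * p = p * j + p := by ring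
    exact ⟨⟨2 + j, by ring⟩, by omega, by omega⟩
  · rintro ⟨⟨k, rfl⟩, h2, h3⟩
    have hk1 : p * 1 < p * k := by
      calc p * 1 = p := by ring
      _ < 2 * p := by omega
      _ ≤ p * k := h2
    have hk : 2 ≤ k := Nat.lt_of_mul_lt_mul_left hk1
    obtain ⟨j, rfl⟩ : ∃ j, k = j + 2 := ⟨k - 2, by omega⟩
    refine ⟨j, ?_, by ring⟩
    have h4 : p * (j + 2) = p * j + 2 * p := by ring
    have h5 : (j + 1) * p = p * j + p := by ring
    have : j + 1 ≤ (n - 2 * p + p - 1) / p :=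
      (Nat.le_div_iff_mul_le (by omega : 0 < p)).mpr (by omega)
    omega

def sieveFold (n t : Nat) : List Bool :=
  (List.range' 2 t).foldl (sieveStep n) (List.replicate n false)

lemma sieveFold_length (n t : Nat) : (sieveFold n t).length = n := by
  induction t with
  | zero => simp [sieveFold]
  | succ t ih =>
    rw [sieveFold, List.range'_concat, List.foldl_append, List.foldl_cons, List.foldl_nil]
    rw [sieveFold] at ih
    unfold sieveStep
    split
    · exact ih
    · rw [foldl_set_length]; exact ih

lemma sieve_invariant (n t : Nat) (ht : 2 + t ≤ n) :
    ∀ i < n, ((sieveFold n t).getD i false = true ↔ Comp (t + 1) i) := by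
  induction t with
  | zero =>
    intro i hi
    simp only [sieveFold, List.range'_zero, List.foldl_nil]
    constructor
    · intro h
      rw [List.getD_eq_getElem?_getD] at h
      simp [hi] at h
    · rintro ⟨d, h1, h2, -, -⟩; omega
  | succ t ih =>
    intro i hi
    have ihp := ih (by omega)
    have hlen : (sieveFold n t).length = n := sieveFold_length n t
    rw [sieveFold, List.range'_concat, List.foldl_append, List.foldl_cons, List.foldl_nil]
    rw [show (2 + 1 * t) = 2 + t by omega]
    change ((sieveStep n (sieveFold n t) (2 + t)).getD i false = true ↔ _)
    set p := 2 + t with hp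
    unfold sieveStep
    by_cases hsk : (sieveFold n t).getD p false = true
    · -- p is already marked composite: skipping keeps the invariant, because every
      -- multiple of p (with cofactor ≥ 2) is a multiple of a smaller divisor of p
      rw [if_pos hsk, ihp i hi]
      have hpc : Comp (t + 1) p := (ihp p (by omega)).mp hsk
      obtain ⟨e, he2, heb, hedvd, hele⟩ := hpc
      constructor
      · rintro ⟨d, h1, h2, h3, h4⟩; exact ⟨d, h1, by omega, h3, h4⟩
      · rintro ⟨d, h1, h2, h3, h4⟩
        by_cases hd : d ≤ t + 1
        · exact ⟨d, h1, hd, h3, h4⟩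
        · have hdp : d = p := by omega
          rw [hdp] at h3 h4
          have hep : e ≤ p := Nat.le_of_dvd (by omega) hedvd
          exact ⟨e, he2, by omega, hedvd.trans h3, by omega⟩
    · rw [if_neg hsk]
      rw [foldl_set_getD _ _ _ (by omega)]
      rw [Bool.or_eq_true, ihp i hi, decide_eq_true_eq,
          mem_mult_range n p i (by omega)]
      constructor
      · rintro (⟨d, h1, h2, h3, h4⟩ | ⟨hdvd, hle, -⟩)
        · exact ⟨d, h1, by omega, h3, h4⟩
        · exact ⟨p, by omega, by omega, hdvd, by omega⟩
      · rintro ⟨d, h1, h2, h3, h4⟩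
        by_cases hd : d ≤ t + 1
        · exact Or.inl ⟨d, h1, hd, h3, h4⟩
        · have hdp : d = p := by omega
          rw [hdp] at h3 h4
          exact Or.inr ⟨h3, by omega, hi⟩

lemma isPrimeA_eq (i : Nat) : isPrimeA i = true ↔ Nat.Prime i := by
  unfold isPrimeA
  by_cases h2 : i < 2
  · simp [h2]; exact fun hp => absurd hp.two_le (by omega)
  · simp only [h2, if_false, List.all_eq_true, List.mem_range'_1]
    rw [Nat.prime_def_le_sqrt]
    constructor
    · rintro h
      refine ⟨by omega, fun m hm hms => ?_⟩
      have := h m ⟨hm, by omega⟩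
      simpa [Nat.dvd_iff_mod_eq_zero] using this
    · rintro ⟨-, h⟩ m ⟨hm1, hm2⟩
      have hs : 0 < Nat.sqrt i := Nat.sqrt_pos.mpr (by omega)
      have : m ≤ Nat.sqrt i := by omega
      simpa [Nat.dvd_iff_mod_eq_zero] using h m hm1 this

lemma not_comp_iff_prime (n i : Nat) (h2 : 2 ≤ i) (hin : i < n) :
    ¬ Comp (n - 1) i ↔ Nat.Prime i := by
  constructor
  · intro h
    by_contra hp
    obtain ⟨m, hm1, hm2, hm3⟩ := Nat.exists_dvd_of_not_prime2 h2 hp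
    obtain ⟨k, hk⟩ := hm1
    have hk1 : m * 1 < m * k := by
      have : m < m * k := hk ▸ hm3
      omega
    have h2k : 2 ≤ k := Nat.lt_of_mul_lt_mul_left hk1
    have : m * 2 ≤ m * k := Nat.mul_le_mul_left m h2k
    exact h ⟨m, hm2, by omega, ⟨k, hk⟩, by omega⟩
  · rintro hp ⟨d, hd2, hdb, hdvd, hdle⟩
    rcases (Nat.Prime.eq_one_or_self_of_dvd hp d hdvd) with h | h <;> omega

lemma folds_eq (cs : List Char) :
    ((List.range cs.length).foldl
      (fun (acc : PySem.Set Char) i =>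
        let c := cs.getD i ' '
        if isPrimeA i && PySem.Chars.islower c
            && !(PySem.Set.contains (PySem.Set.ofList ['a', 'e', 'i', 'o', 'u']) c)
        then PySem.Set.add acc c else acc)
      PySem.Set.empty)
    = ((List.range' 2 (cs.length - 2)).foldl
      (fun (acc : PySem.Set Char) i =>
        if (sieveFold cs.length (cs.length - 2)).getD i false then acc
        else
          let c := cs.getD i ' '
          if PySem.Chars.islower c
              && !(PySem.Set.contains (PySem.Set.ofList ['a', 'e', 'i', 'o', 'u']) c)
          then PySem.Set.add acc c else acc)
      PySem.Set.empty) := by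
  set n := cs.length with hn
  rcases Nat.lt_or_ge n 2 with hlt | hge
  · have hz : n - 2 = 0 := by omega
    rw [hz, List.range'_zero, List.foldl_nil]
    interval_cases n
    · rw [List.range_zero, List.foldl_nil]
    · rw [List.range_one, List.foldl_cons, List.foldl_nil]
      simp [show isPrimeA 0 = false from rfl]
  · have hsplit : List.range n = [0, 1] ++ List.range' 2 (n - 2) := by
      rw [show n = 2 + (n - 2) by omega, List.range_add, List.range'_eq_map_range,
        show (2 : Nat) + (n - 2) - 2 = n - 2 from by omega]
      rfl
    rw [hsplit, List.foldl_append, List.foldl_cons, List.foldl_cons, List.foldl_nil]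
    simp only [show isPrimeA 0 = false from rfl, show isPrimeA 1 = false from rfl,
      Bool.false_and, Bool.false_eq_true, if_false]
    apply PySem.List.foldl_congr_mem
    intro acc i hi
    rw [List.mem_range'_1] at hi
    have h2i : 2 ≤ i := hi.1
    have hin : i < n := by omega
    have hinv := sieve_invariant n (n - 2) (by omega) i hin
    rw [show n - 2 + 1 = n - 1 by omega] at hinv
    by_cases hp : Nat.Prime i
    · have hA : isPrimeA i = true := (isPrimeA_eq i).mpr hp
      have hB : (sieveFold n (n - 2)).getD i false = false := by
        rcases Bool.eq_false_or_eq_true ((sieveFold n (n - 2)).getD i false) with h | h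
        · exact absurd (hinv.mp h) ((not_comp_iff_prime n i h2i hin).mpr hp)
        · exact h
      rw [hB]
      simp only [hA, Bool.true_and, Bool.false_eq_true, if_false]
    · have hA : isPrimeA i = false := by
        rcases Bool.eq_false_or_eq_true (isPrimeA i) with h | h
        · exact absurd ((isPrimeA_eq i).mp h) hp
        · exact h
      have hB : (sieveFold n (n - 2)).getD i false = true :=
        hinv.mpr (by
          by_contra hc
          exact hp ((not_comp_iff_prime n i h2i hin).mp hc))
      rw [hB]
      simp only [hA, Bool.false_and, Bool.false_eq_true, if_false, if_true]

-- ===== VERDICT (by name: the statement is the Claim_ definition above) =====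
theorem count_distinct_lower_spec : Claim_equal_count_distinct_lower := by
  intro s _
  unfold Spec_count_distinct_lower count_distinct_lower count_distinct_lower_alt
  simp only []
  exact congrArg PySem.Set.len (folds_eq s.toList)
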